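-- pv_equiv track=rewrite | github.com/UE-alicja-pegiel/drzewo_decyzyjne | proby.py | podzial
-- ===== SOURCE A (Python) =====
-- def podzial(tab: list) -> dict:
--     """
--     :param tab: lista składająca się z atrybutów (a1, a2, ..., d)
--     :return: słownik wystąpień wartości atrybutów decyzyjnych dla poszczególnych atrybutów
--     """
--     slownik = {}
--
--     for idx, element in enumerate(tab[:len(tab)-1]):
--         elementy = {i: {j: 0 for j in tab[-1]} for i in set(element)}
--         slownik["a"+f"{idx+1}"] = elementy
--
--     for d in set(tab[-1]):
--         for i, element in enumerate(tab[:len(tab)-1]):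
--             for idx, el in enumerate(tab[-1]):
--                 if el == d:
--                     slownik["a" + f"{i + 1}"][element[idx]][d] += 1
--     return slownik
-- ===== SOURCE B (Python) =====
-- def podzial(tab: list) -> dict:
--     """Per column: one flat (value, decision) pair counter built in a single pass
--     over zip(column, decisions); rows start as copies of one zero template and the
--     nonzero cells are written back from the counter (no outer loop over distinct
--     decision values)."""
--     dec = tab[-1]
--     zeros = dict.fromkeys(dec, 0)
--     out = {}
--     for idx, col in enumerate(tab[:-1]):
--         cnt = {}
--         for pair in zip(col, dec):
--             cnt[pair] = cnt.get(pair, 0) + 1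
--         inner = {v: zeros.copy() for v in dict.fromkeys(col)}
--         for (v, d), c in cnt.items():
--             inner[v][d] = c
--         out["a" + str(idx + 1)] = inner
--     return out
-- ===== Notes on version B (the rewrite author's own statement) =====
-- stated objective: alternative
-- what changed: B builds, per column, a flat (value, decision) pair counter in one pass over zip(column, decisions), starts every row as a copy of one zero template, and writes the nonzero cells back from the counter, instead of A's outer loop over the distinct decision values that rescans the whole decision column for every (decision value, column) pair and increments nested dicts in place.
import Mathlib
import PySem

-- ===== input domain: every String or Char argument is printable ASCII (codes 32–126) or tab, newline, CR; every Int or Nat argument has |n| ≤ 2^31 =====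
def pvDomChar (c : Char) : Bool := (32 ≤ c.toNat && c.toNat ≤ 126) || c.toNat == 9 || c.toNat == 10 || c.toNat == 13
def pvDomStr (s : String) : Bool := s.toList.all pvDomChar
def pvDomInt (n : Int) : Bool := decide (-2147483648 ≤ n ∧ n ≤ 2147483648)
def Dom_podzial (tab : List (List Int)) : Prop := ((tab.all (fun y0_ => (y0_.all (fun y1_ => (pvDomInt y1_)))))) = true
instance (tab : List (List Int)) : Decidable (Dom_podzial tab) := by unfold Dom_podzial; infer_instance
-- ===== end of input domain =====

-- B replaces A's outer loop over distinct decision values (which rescans the whole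
-- decision column per decision value and column) by one flat (value, decision) pair
-- counter per column, built in a single pass over zip(column, decisions); rows start
-- as one shared zero template and the counter is written back into them.

-- ===== PORT A =====
-- Literal port of A.  tab[-1] is PySem.List.pyGet? tab (-1) (none = IndexError, excluded
-- by Pre_podzial); element[idx] is PySem.List.pyGetD (in range under Pre_podzial, where
-- Python returns; out of range Python raises IndexError and those inputs are outside Pre_).
def podzial (tab : List (List Int)) : List (String × List (Int × List (Int × Int))) :=
  match PySem.List.pyGet? tab (-1) with
  | none => []  -- Python raises IndexError here (tab = []); outside Pre_podzial
  | some dec =>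
    -- first loop: slownik["a"+str(idx+1)] = {i: {j: 0 for j in tab[-1]} for i in set(element)}
    let slownik : PySem.Dict String (PySem.Dict Int (PySem.Dict Int Int)) :=
      (PySem.List.enumerate (PySem.List.slice tab none (some ((tab.length : Int) - 1)))).foldl
        (fun sl p =>
          sl.insert ("a" ++ PySem.Int.toStr (p.1 + 1))
            ((PySem.Set.ofList p.2).foldl
              (fun d i => d.insert i (dec.foldl (fun d2 j => d2.insert j 0) PySem.Dict.empty))
              PySem.Dict.empty))
        PySem.Dict.empty
    -- second loop: for d in set(tab[-1]): for i, element: for idx, el: if el == d: += 1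
    let slownik2 :=
      (PySem.Set.ofList dec).foldl
        (fun sl d =>
          (PySem.List.enumerate (PySem.List.slice tab none (some ((tab.length : Int) - 1)))).foldl
            (fun sl q =>
              (PySem.List.enumerate dec).foldl
                (fun sl r =>
                  if r.2 == d then
                    sl.modify ("a" ++ PySem.Int.toStr (q.1 + 1)) PySem.Dict.empty
                      (fun inner =>
                        inner.modify (PySem.List.pyGetD q.2 r.1 0) PySem.Dict.empty
                          (fun cnts => cnts.modify d 0 (· + 1)))
                  else sl)
                sl)
            sl)
        slownik
    slownik2.items.map (fun p => (p.1, p.2.items.map (fun q => (q.1, q.2.items))))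

-- ===== PORT B =====
-- Literal port of B (Source B): per column a flat (value, decision) counter over
-- zip(col, dec); rows start as the zero template (dict.fromkeys(dec, 0), whose
-- .copy() is value reuse here since Dicts are immutable) and the nonzero cells are
-- written back from the counter.  inner[v][d] = c is modify at v with insert at d.
def podzial_alt (tab : List (List Int)) : List (String × List (Int × List (Int × Int))) :=
  match PySem.List.pyGet? tab (-1) with
  | none => []  -- Python raises IndexError here (tab = []); outside Pre_podzial
  | some dec =>
    let zeros : PySem.Dict Int Int := dec.foldl (fun z j => z.insert j 0) PySem.Dict.empty
    let out : PySem.Dict String (PySem.Dict Int (PySem.Dict Int Int)) :=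
      (PySem.List.enumerate (PySem.List.slice tab none (some (-1)))).foldl
        (fun out p =>
          let cnt : PySem.Dict (Int × Int) Int :=
            (p.2.zip dec).foldl (fun c pr => c.insert pr (c.getD pr 0 + 1)) PySem.Dict.empty
          let inner0 : PySem.Dict Int (PySem.Dict Int Int) :=
            (PySem.List.dedup p.2).foldl (fun di v => di.insert v zeros) PySem.Dict.empty
          let inner :=
            cnt.items.foldl
              (fun di a => di.modify a.1.1 PySem.Dict.empty (fun row => row.insert a.1.2 a.2))
              inner0
          out.insert ("a" ++ PySem.Int.toStr (p.1 + 1)) inner)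
        PySem.Dict.empty
    out.items.map (fun p => (p.1, p.2.items.map (fun q => (q.1, q.2.items))))

-- ===== PRECONDITION & SPEC =====
-- Pre_podzial: exactly the inputs on which Python A returns normally: tab non-empty
-- (else tab[-1] raises IndexError) and no attribute column shorter than the decision
-- column (else element[idx] raises IndexError).
def Pre_podzial (tab : List (List Int)) : Prop :=
  tab ≠ [] ∧ ∀ col ∈ tab.dropLast, (tab.getLastD []).length ≤ col.length
instance (tab : List (List Int)) : Decidable (Pre_podzial tab) := by unfold Pre_podzial; infer_instance

def pvWitness_podzial : List (List Int) := [[1, 2, 1], [0, 1, 0]]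

def Spec_podzial (tab : List (List Int)) (out : List (String × List (Int × List (Int × Int)))) : Prop := out = podzial_alt tab
instance (tab : List (List Int)) (out : List (String × List (Int × List (Int × Int)))) : Decidable (Spec_podzial tab out) := by unfold Spec_podzial; infer_instance

-- ===== CLAIM (what is proved, stated in full; the proofs are below) =====
def Claim_equal_podzial : Prop := ∀ (tab : List (List Int)), Dom_podzial tab → Pre_podzial tab → Spec_podzial tab (podzial tab)


-- ===== LEMMAS AND PROOFS =====

-- decimal digits are pairwise distinct characters
lemma pv_digitChar_inj : ∀ m < 10, ∀ n < 10, Nat.digitChar m = Nat.digitChar n → m = n := by decide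

lemma pv_toDigits_ne_nil (n : Nat) : Nat.toDigits 10 n ≠ [] := by
  rw [Nat.toDigits_eq_if (by norm_num)]
  split <;> simp

lemma pv_toDigits_inj : ∀ m n : Nat, Nat.toDigits 10 m = Nat.toDigits 10 n → m = n := by
  intro m
  induction m using Nat.strong_induction_on with
  | _ m ih =>
    intro n h
    rw [Nat.toDigits_eq_if (b := 10) (n := n) (by norm_num),
        Nat.toDigits_eq_if (b := 10) (n := m) (by norm_num)] at h
    by_cases hm : m < 10 <;> by_cases hn : n < 10
    · rw [if_pos hm, if_pos hn] at h
      exact pv_digitChar_inj m hm n hn (by simpa using h)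
    · exfalso
      rw [if_pos hm, if_neg hn] at h
      have hlen := congrArg List.length h
      simp only [List.length_cons, List.length_nil, List.length_append] at hlen
      exact pv_toDigits_ne_nil (n / 10) (List.eq_nil_of_length_eq_zero (by omega))
    · exfalso
      rw [if_neg hm, if_pos hn] at h
      have hlen := congrArg List.length h
      simp only [List.length_cons, List.length_nil, List.length_append] at hlen
      exact pv_toDigits_ne_nil (m / 10) (List.eq_nil_of_length_eq_zero (by omega))
    · rw [if_neg hm, if_neg hn] at h
      obtain ⟨h1, h2⟩ := List.append_inj' h (by simp)
      have hd : m / 10 = n / 10 := ih (m / 10) (by omega) _ h1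
      have hm2 : m % 10 = n % 10 :=
        pv_digitChar_inj (m % 10) (by omega) (n % 10) (by omega) (by simpa using h2)
      omega

lemma pv_key_inj (i j : Int) (hi : 0 ≤ i) (hj : 0 ≤ j)
    (h : ("a" ++ PySem.Int.toStr (i + 1)) = ("a" ++ PySem.Int.toStr (j + 1))) : i = j := by
  have h' := congrArg String.toList h
  rw [String.toList_append, String.toList_append] at h'
  have h2 : (PySem.Int.toStr (i + 1)).toList = (PySem.Int.toStr (j + 1)).toList := by
    simpa using h'
  unfold PySem.Int.toStr at h2
  rw [String.toList_ofList, String.toList_ofList] at h2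
  unfold PySem.Int.toChars at h2
  rw [if_neg (by omega), if_neg (by omega)] at h2
  have := pv_toDigits_inj _ _ h2
  omega

lemma pv_key_nodup (cols : List (List Int)) :
    ((PySem.List.enumerate cols 0).map (fun p => "a" ++ PySem.Int.toStr (p.1 + 1))).Nodup := by
  rw [List.Nodup, List.pairwise_map]
  refine List.Pairwise.imp_of_mem ?_ (PySem.List.pairwise_lt_enumerate cols 0)
  intro a b ha hb hlt heq
  obtain ⟨k, hk, rfl⟩ := (PySem.List.mem_enumerate_iff _ _ _).1 ha
  obtain ⟨k', hk', rfl⟩ := (PySem.List.mem_enumerate_iff _ _ _).1 hb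
  have := pv_key_inj _ _ (by omega) (by omega) heq
  simp at hlt this
  omega

lemma pv_foldl_len {α : Type} : ∀ (l : List α) (c : Int),
    l.foldl (fun v _ => v + 1) c = c + l.length := by
  intro l
  induction l with
  | nil => simp
  | cons a t ih => intro c; simp [List.foldl_cons, ih]; omega

lemma pv_flatMap_single {α γ : Type} : ∀ (l : List α), l.Nodup → ∀ (p : α), p ∈ l →
    ∀ (cond : α → Bool) (h : α → List γ), (∀ q ∈ l, (cond q = true ↔ q = p)) →
    l.flatMap (fun q => if cond q then h q else []) = h p := by
  intro l
  induction l with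
  | nil => intro _ p hp; simp at hp
  | cons a t ih =>
    intro hnd p hp cond h hc
    rcases hnd with _ | ⟨hat, hndt⟩
    rcases List.mem_cons.1 hp with rfl | hpt
    · have hca : cond p = true := (hc p List.mem_cons_self).2 rfl
      have ht0 : t.flatMap (fun q => if cond q then h q else []) = [] := by
        rw [List.flatMap_eq_nil_iff]
        intro q hq
        have hcq : cond q = false := by
          rcases Bool.eq_false_or_eq_true (cond q) with htr | hf
          · exact absurd ((hc q (List.mem_cons_of_mem _ hq)).1 htr)
              (fun he => (hat q hq) he.symm)
          · exact hf
        simp [hcq]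
      simp [List.flatMap_cons, hca, ht0]
    · have hca : cond a = false := by
        rcases Bool.eq_false_or_eq_true (cond a) with htr | hf
        · exact absurd ((hc a List.mem_cons_self).1 htr)
            (fun he => (hat p hpt) he)
        · exact hf
      rw [List.flatMap_cons, hca]
      simp only [Bool.false_eq_true, if_false, List.nil_append]
      exact ih hndt p hpt cond h (fun q hq => hc q (List.mem_cons_of_mem _ hq))

-- find? on a dict whose items are a key-value map over a Nodup key list
lemma pv_find?_map {β κ ν : Type} [BEq κ] [LawfulBEq κ] :
    ∀ (K : List β) (kf : β → κ) (vf : β → ν), ((K.map kf).Nodup) → ∀ (b : β), b ∈ K →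
    (K.map (fun x => (kf x, vf x))).find? (fun p => p.1 == kf b) = some (kf b, vf b) := by
  intro K
  induction K with
  | nil => intro kf vf _ b hb; simp at hb
  | cons a t ih =>
    intro kf vf hnd b hb
    rcases hnd with _ | ⟨hat, hndt⟩
    rw [List.map_cons, List.find?_cons]
    by_cases hab : kf a = kf b
    · have hb' : b = a := by
        rcases List.mem_cons.1 hb with rfl | hbt
        · rfl
        · exact absurd hab (hat (kf b) (List.mem_map_of_mem hbt))
      subst hb'
      simp
    · have hfa : ((kf a, vf a).1 == kf b) = false := by simpa using hab
      simp only [hfa]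
      have hbt : b ∈ t := by
        rcases List.mem_cons.1 hb with rfl | hbt
        · exact absurd rfl hab
        · exact hbt
      exact ih kf vf hndt b hbt

lemma pv_items_modify {β κ ν : Type} [BEq κ] [LawfulBEq κ]
    (K : List β) (kf : β → κ) (vf : β → ν) (hnd : (K.map kf).Nodup)
    (b : β) (hb : b ∈ K) (dflt : ν) (f : ν → ν)
    (d : PySem.Dict κ ν) (hd : d.items = K.map (fun x => (kf x, vf x))) :
    (d.modify (kf b) dflt f).items
      = K.map (fun x => (kf x, if kf x == kf b then f (vf x) else vf x)) := by
  have hget : d.getD (kf b) dflt = vf b := by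
    unfold PySem.Dict.getD PySem.Dict.get?
    rw [hd, pv_find?_map K kf vf hnd b hb]
    rfl
  have hcont : d.contains (kf b) = true := by
    unfold PySem.Dict.contains
    rw [hd, List.any_eq_true]
    exact ⟨(kf b, vf b), List.mem_map_of_mem hb, by simp⟩
  unfold PySem.Dict.modify PySem.Dict.insert
  rw [if_pos hcont, hget, hd, List.map_map]
  apply List.map_congr_left
  intro x hx
  by_cases hxb : kf x = kf b
  · have : x = b := List.inj_on_of_nodup_map hnd hx hb hxb
    subst this
    simp
  · simp [Function.comp, hxb]

lemma pv_items_foldl_modify {β κ ν α : Type} [BEq κ] [LawfulBEq κ]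
    (K : List β) (kf : β → κ) (hnd : (K.map kf).Nodup)
    (F : α → ν → ν) (dflt : ν) (tgt : α → κ) :
    ∀ (L : List α), (∀ a ∈ L, ∃ b ∈ K, tgt a = kf b) →
    ∀ (vf : β → ν) (d : PySem.Dict κ ν), d.items = K.map (fun x => (kf x, vf x)) →
    (L.foldl (fun d a => d.modify (tgt a) dflt (F a)) d).items
      = K.map (fun x => (kf x, (L.filter (fun a => tgt a == kf x)).foldl (fun v a => F a v) (vf x))) := by
  intro L
  induction L with
  | nil => intro _ vf d hd; simpa using hd
  | cons a L' ih =>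
    intro htgt vf d hd
    obtain ⟨b, hb, htga⟩ := htgt a List.mem_cons_self
    rw [List.foldl_cons]
    have hstep : (d.modify (tgt a) dflt (F a)).items
        = K.map (fun x => (kf x, if kf x == kf b then F a (vf x) else vf x)) := by
      rw [htga]
      exact pv_items_modify K kf vf hnd b hb dflt (F a) d hd
    rw [ih (fun a' ha' => htgt a' (List.mem_cons_of_mem _ ha')) _ _ hstep]
    apply List.map_congr_left
    intro x hx
    by_cases hxb : kf x = kf b
    · have hc : (tgt a == kf x) = true := by simp [htga, hxb]
      rw [List.filter_cons, hc, if_pos rfl, List.foldl_cons]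
      simp [hxb]
    · have hc : (tgt a == kf x) = false := by
        rw [htga]
        exact beq_eq_false_iff_ne.2 (fun he => hxb he.symm)
      rw [List.filter_cons, hc]
      simp [hxb]

-- proof-side names for the pieces of A's port
def pvZeros (dec : List Int) : PySem.Dict Int Int :=
  dec.foldl (fun d2 j => d2.insert j 0) PySem.Dict.empty

def pvInit (col dec : List Int) : PySem.Dict Int (PySem.Dict Int Int) :=
  (PySem.Set.ofList col).foldl (fun d i => d.insert i (pvZeros dec)) PySem.Dict.empty

def pvCnt (col dec : List Int) (v d0 : Int) : Nat :=
  (((col.zip dec).filter (fun a => a.1 == v)).filter (fun a => a.2 == d0)).length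

-- the common value of both ports on cols = tab[:-1], dec = tab[-1]
def pvCanon (cols : List (List Int)) (dec : List Int) : List (String × List (Int × List (Int × Int))) :=
  (PySem.List.enumerate cols 0).map (fun p =>
    ("a" ++ PySem.Int.toStr (p.1 + 1), (PySem.Set.ofList p.2).map (fun v =>
      (v, (PySem.Set.ofList dec).map (fun d0 => (d0, (pvCnt p.2 dec v d0 : Int)))))))

lemma pv_zeros_aux : ∀ (l K : List Int),
    ((l.foldl (fun d2 j => d2.insert j (0:Int)) (PySem.Dict.mk (K.map (fun k => (k, (0:Int)))))).items)
      = (PySem.Set.update K l).map (fun k => (k, (0:Int))) := by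
  intro l
  induction l with
  | nil => intro K; rfl
  | cons j l' ih =>
    intro K
    rw [List.foldl_cons]
    have hups : PySem.Set.update K (j :: l') = PySem.Set.update (PySem.Set.add K j) l' := rfl
    by_cases hj : K.contains j = true
    · have hcont : (PySem.Dict.mk (K.map (fun k => (k, (0:Int))))).contains j = true := by
        unfold PySem.Dict.contains
        rw [List.contains_eq_any_beq] at hj
        simpa [List.any_map, Function.comp] using hj
      have hins : (PySem.Dict.mk (K.map (fun k => (k, (0:Int))))).insert j 0
          = PySem.Dict.mk (K.map (fun k => (k, (0:Int)))) := by
        unfold PySem.Dict.insert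
        rw [if_pos hcont]
        congr 1
        show List.map _ (K.map (fun k => (k, (0:Int)))) = _
        rw [List.map_map]
        apply List.map_congr_left
        intro k _
        by_cases hk : k = j
        · simp [hk]
        · simp [hk]
      rw [hins, hups]
      have hadd : PySem.Set.add K j = K := by
        unfold PySem.Set.add PySem.Set.contains
        rw [if_pos hj]
      rw [hadd]
      exact ih K
    · have hjm : j ∉ K := by simpa using hj
      have hcont : (PySem.Dict.mk (K.map (fun k => (k, (0:Int))))).contains j = false := by
        unfold PySem.Dict.contains
        rw [List.any_eq_false]
        intro p hp
        obtain ⟨x, hx, rfl⟩ := List.mem_map.1 hp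
        have hxj : x ≠ j := fun he => hjm (he ▸ hx)
        simpa using hxj
      have hins : (PySem.Dict.mk (K.map (fun k => (k, (0:Int))))).insert j 0
          = PySem.Dict.mk ((K ++ [j]).map (fun k => (k, (0:Int)))) := by
        unfold PySem.Dict.insert
        rw [hcont]
        simp
      rw [hins, hups]
      have hadd : PySem.Set.add K j = K ++ [j] := by
        unfold PySem.Set.add PySem.Set.contains
        rw [if_neg hj]
      rw [hadd]
      exact ih (K ++ [j])

lemma pv_zeros_items (dec : List Int) :
    (pvZeros dec).items = (PySem.Set.ofList dec).map (fun k => (k, (0:Int))) := by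
  have h := pv_zeros_aux dec []
  simpa [pvZeros, PySem.Set.update, PySem.Set.ofList, PySem.Dict.empty] using h

lemma pv_init_items (col dec : List Int) :
    (pvInit col dec).items = (PySem.Set.ofList col).map (fun v => (v, pvZeros dec)) := by
  unfold pvInit
  have h := PySem.Dict.items_foldl_insert_fresh (l := PySem.Set.ofList col)
      (k := fun (a : Int) => a) (v := fun _ => pvZeros dec) (d := PySem.Dict.empty)
      (fun a _ => PySem.Dict.contains_empty a) (by simp)
  simpa using h

-- the A-side count (positions of dec, reading col by index) equals the zip count
lemma pv_cnt_eq : ∀ (dec col : List Int) (s : Nat) (v d0 : Int), s + dec.length ≤ col.length →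
    (((PySem.List.enumerate dec (s : Int)).filter (fun r => r.2 == d0)).filter
        (fun r => PySem.List.pyGetD col r.1 0 == v)).length
      = ((((col.drop s).zip dec).filter (fun a => a.1 == v)).filter (fun a => a.2 == d0)).length := by
  intro dec
  induction dec with
  | nil => intro col s v d0 _; simp [PySem.List.enumerate_nil]
  | cons e dec' ih =>
    intro col s v d0 hlen
    have hs : s < col.length := by simp at hlen; omega
    rw [PySem.List.enumerate.eq_2, List.drop_eq_getElem_cons hs]
    have hget : PySem.List.pyGetD col ((s : Nat) : Int) 0 = col[s] := by
      rw [PySem.List.pyGetD_natCast]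
      exact List.getD_eq_getElem col 0 hs
    have hcast : ((s : Int) + 1) = (((s + 1 : Nat)) : Int) := by push_cast; ring
    have ih' := ih col (s + 1) v d0 (by simp at hlen ⊢; omega)
    rw [List.zip_cons_cons]
    rw [List.filter_filter, List.filter_filter] at ih' ⊢
    rw [List.filter_cons, List.filter_cons, hcast]
    by_cases hcv : col[s] = v <;> by_cases hed : e = d0 <;>
      simp [hget, hcv, hed] <;> (rw [hcast]; exact ih')

-- counting a pair in a list equals the nested filter length used in pvCnt
lemma pv_count_pair : ∀ (l : List (Int × Int)) (v d0 : Int),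
    (l.count (v, d0) : Int) = ((((l.filter (fun a => a.1 == v)).filter (fun a => a.2 == d0)).length : Nat) : Int) := by
  intro l v d0
  congr 1
  induction l with
  | nil => simp
  | cons a t ih =>
    rw [List.filter_filter] at ih ⊢
    rw [List.count_cons, List.filter_cons]
    by_cases h1 : a.1 = v <;> by_cases h2 : a.2 = d0 <;>
      simp [Prod.ext_iff, h1, h2, ih]

lemma pv_mem_zip {α β : Type} {a : α × β} {l1 : List α} {l2 : List β}
    (h : a ∈ l1.zip l2) : a.1 ∈ l1 ∧ a.2 ∈ l2 := by
  obtain ⟨i, hi, rfl⟩ := List.mem_iff_getElem.1 h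
  rw [List.getElem_zip]
  constructor <;> apply List.getElem_mem

-- a fold of plain overwrites (d.insert (key b) (val b)) with pairwise-distinct keys,
-- all already present, rewrites each present key to its (unique) new value
lemma pv_items_foldl_insert_over {β : Type} :
    ∀ (L : List β) (key : β → Int) (val : β → Int) (K : List Int) (vf : Int → Int)
      (dct : PySem.Dict Int Int), dct.items = K.map (fun k => (k, vf k)) →
      (∀ b ∈ L, key b ∈ K) → (L.map key).Nodup →
      (L.foldl (fun d b => d.insert (key b) (val b)) dct).items
        = K.map (fun k => (k, match L.find? (fun b => key b == k) with
            | some b => val b | none => vf k)) := by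
  intro L
  induction L with
  | nil => intro key val K vf dct hd _ _; simpa using hd
  | cons b L' ih =>
    intro key val K vf dct hd hmem hnd
    rw [List.map_cons, List.nodup_cons] at hnd
    obtain ⟨hbk, hnd'⟩ := hnd
    have hkb : dct.contains (key b) = true := by
      unfold PySem.Dict.contains
      rw [hd, List.any_eq_true]
      exact ⟨(key b, vf (key b)), List.mem_map_of_mem (hmem b List.mem_cons_self), by simp⟩
    have hstep : (dct.insert (key b) (val b)).items
        = K.map (fun k => (k, if k == key b then val b else vf k)) := by
      unfold PySem.Dict.insert
      rw [if_pos hkb, hd, List.map_map]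
      apply List.map_congr_left
      intro k hk
      by_cases h : k = key b <;> simp [Function.comp, h]
    rw [List.foldl_cons, ih key val K _ _ hstep
        (fun b' hb' => hmem b' (List.mem_cons_of_mem _ hb')) hnd']
    apply List.map_congr_left
    intro k hk
    rw [List.find?_cons]
    by_cases h : key b = k
    · have hb : (key b == k) = true := by simpa using h
      rw [hb]
      have hnone : L'.find? (fun b' => key b' == k) = none := by
        rw [List.find?_eq_none]
        intro b' hb'
        simp only [beq_iff_eq]
        intro he
        exact hbk (by rw [h, ← he]; exact List.mem_map_of_mem hb')
      rw [hnone]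
      simp [← h]
    · have hb : (key b == k) = false := by simpa using h
      rw [hb]
      cases hfind : L'.find? (fun b' => key b' == k) with
      | some b' => simp
      | none =>
        have hk2 : (k == key b) = false := by
          simpa using fun he => h he.symm
        simp [hk2]

-- B's body (on cols = tab[:-1], dec = tab[-1]) computes the canonical table
lemma pv_B_eq (cols : List (List Int)) (dec : List Int) :
    ((PySem.List.enumerate cols 0).foldl
        (fun out p =>
          out.insert ("a" ++ PySem.Int.toStr (p.1 + 1))
            (((p.2.zip dec).foldl (fun c pr => c.insert pr (c.getD pr 0 + 1))
                (PySem.Dict.empty : PySem.Dict (Int × Int) Int)).items.foldl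
              (fun di a => di.modify a.1.1 PySem.Dict.empty (fun row => row.insert a.1.2 a.2))
              ((PySem.List.dedup p.2).foldl
                (fun di v => di.insert v (dec.foldl (fun z j => z.insert j 0) PySem.Dict.empty))
                PySem.Dict.empty)))
        PySem.Dict.empty).items.map
      (fun p => (p.1, p.2.items.map (fun q => (q.1, q.2.items)))) = pvCanon cols dec := by
  have hout :
      ((PySem.List.enumerate cols 0).foldl
        (fun out p =>
          out.insert ("a" ++ PySem.Int.toStr (p.1 + 1))
            (((p.2.zip dec).foldl (fun c pr => c.insert pr (c.getD pr 0 + 1))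
                (PySem.Dict.empty : PySem.Dict (Int × Int) Int)).items.foldl
              (fun di a => di.modify a.1.1 PySem.Dict.empty (fun row => row.insert a.1.2 a.2))
              ((PySem.List.dedup p.2).foldl
                (fun di v => di.insert v (dec.foldl (fun z j => z.insert j 0) PySem.Dict.empty))
                PySem.Dict.empty)))
        PySem.Dict.empty).items
      = (PySem.List.enumerate cols 0).map (fun p => ("a" ++ PySem.Int.toStr (p.1 + 1),
          ((p.2.zip dec).foldl (fun c pr => c.insert pr (c.getD pr 0 + 1))
              (PySem.Dict.empty : PySem.Dict (Int × Int) Int)).items.foldl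
            (fun di a => di.modify a.1.1 PySem.Dict.empty (fun row => row.insert a.1.2 a.2))
            ((PySem.List.dedup p.2).foldl
              (fun di v => di.insert v (dec.foldl (fun z j => z.insert j 0) PySem.Dict.empty))
              PySem.Dict.empty))) := by
    simpa using PySem.Dict.items_foldl_insert_fresh _ _ _ _
      (fun a _ => PySem.Dict.contains_empty _) (pv_key_nodup cols)
  rw [hout, List.map_map]
  unfold pvCanon
  apply List.map_congr_left
  intro p hp
  simp only [Function.comp_def]
  -- the flat pair counter: items are the distinct zip pairs with their counts
  have hcnt : ((p.2.zip dec).foldl (fun c pr => c.insert pr (c.getD pr 0 + 1))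
        (PySem.Dict.empty : PySem.Dict (Int × Int) Int)).items
      = (PySem.Set.ofList (p.2.zip dec)).map (fun k => (k, ((p.2.zip dec).count k : Int))) := by
    rw [PySem.Dict.foldl_insert_getD_add_one_eq_counter]
    exact PySem.Dict.items_counter _
  -- the zero-template row comprehension: one zero row per distinct column value
  have hin0 : ((PySem.List.dedup p.2).foldl
        (fun di v => di.insert v (dec.foldl (fun z j => z.insert j 0) PySem.Dict.empty))
        PySem.Dict.empty).items
      = (PySem.Set.ofList p.2).map (fun v => (v, pvZeros dec)) := by
    have h := pv_init_items p.2 dec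
    simp only [pvInit, pvZeros] at h ⊢
    simpa using h
  -- the write-back loop, per distinct column value
  have h2 := pv_items_foldl_modify
      (K := PySem.Set.ofList p.2) (kf := fun (x : Int) => x)
      (by simp)
      (F := fun (a : (Int × Int) × Int) => fun (row : PySem.Dict Int Int) => row.insert a.1.2 a.2)
      (dflt := PySem.Dict.empty)
      (tgt := fun (a : (Int × Int) × Int) => a.1.1)
      (L := ((p.2.zip dec).foldl (fun c pr => c.insert pr (c.getD pr 0 + 1))
          (PySem.Dict.empty : PySem.Dict (Int × Int) Int)).items)
      (by
        intro a ha
        rw [hcnt] at ha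
        obtain ⟨k, hk, rfl⟩ := List.mem_map.1 ha
        have hkz : k ∈ p.2.zip dec := (PySem.Set.mem_ofList _ _).1 hk
        exact ⟨k.1, (PySem.Set.mem_ofList _ _).2 (pv_mem_zip hkz).1, rfl⟩)
      (vf := fun _ => pvZeros dec)
      (d := (PySem.List.dedup p.2).foldl
          (fun di v => di.insert v (dec.foldl (fun z j => z.insert j 0) PySem.Dict.empty))
          PySem.Dict.empty)
      hin0
  beta_reduce at h2
  rw [h2, List.map_map]
  refine congrArg _ ?_
  apply List.map_congr_left
  intro v hv
  simp only [Function.comp_def]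
  -- the write-backs that hit row v
  have hfil : (((p.2.zip dec).foldl (fun c pr => c.insert pr (c.getD pr 0 + 1))
        (PySem.Dict.empty : PySem.Dict (Int × Int) Int)).items.filter (fun a => a.1.1 == v))
      = ((PySem.Set.ofList (p.2.zip dec)).filter (fun k => k.1 == v)).map
          (fun k => (k, ((p.2.zip dec).count k : Int))) := by
    rw [hcnt, List.filter_map]
    rfl
  rw [hfil]
  have hndS : ((PySem.Set.ofList (p.2.zip dec)).filter (fun k => k.1 == v)).Nodup :=
    (PySem.Set.nodup_ofList _).filter _
  have hover := pv_items_foldl_insert_over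
      (L := ((PySem.Set.ofList (p.2.zip dec)).filter (fun k => k.1 == v)).map
          (fun k => (k, ((p.2.zip dec).count k : Int))))
      (key := fun a => a.1.2) (val := fun a => a.2)
      (K := PySem.Set.ofList dec) (vf := fun _ => 0) (dct := pvZeros dec)
      (by simpa using pv_zeros_items dec)
      (by
        intro a ha
        obtain ⟨k, hk, rfl⟩ := List.mem_map.1 ha
        have hkz : k ∈ p.2.zip dec := (PySem.Set.mem_ofList _ _).1 (List.mem_of_mem_filter hk)
        exact (PySem.Set.mem_ofList _ _).2 (pv_mem_zip hkz).2)
      (by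
        rw [List.map_map]
        refine List.Nodup.map_on ?_ hndS
        intro x hx y hy hxy
        have hx1 : x.1 = v := by simpa using List.of_mem_filter hx
        have hy1 : y.1 = v := by simpa using List.of_mem_filter hy
        have : x = y := Prod.ext (by rw [hx1, hy1]) (by simpa using hxy)
        exact this)
  rw [hover]
  refine congrArg _ ?_
  apply List.map_congr_left
  intro d0 hd0
  rw [List.find?_map]
  by_cases hmem : (v, d0) ∈ p.2.zip dec
  · have hmemS : (v, d0) ∈ (PySem.Set.ofList (p.2.zip dec)).filter (fun k => k.1 == v) :=
      List.mem_filter.2 ⟨(PySem.Set.mem_ofList _ _).2 hmem, by simp⟩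
    cases hfind : ((PySem.Set.ofList (p.2.zip dec)).filter (fun k => k.1 == v)).find?
        ((fun a => a.1.2 == d0) ∘ (fun k => (k, ((p.2.zip dec).count k : Int)))) with
    | none =>
      exfalso
      have := List.find?_eq_none.1 hfind (v, d0) hmemS
      simp [Function.comp] at this
    | some k =>
      have hk2 : k.2 = d0 := by
        have := List.find?_some hfind
        simpa [Function.comp] using this
      have hkmem := List.mem_of_find?_eq_some hfind
      have hk1 : k.1 = v := by simpa using List.of_mem_filter hkmem
      have hkeq : k = (v, d0) := Prod.ext hk1 hk2
      subst hkeq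
      simp only [Option.map_some]
      rw [pv_count_pair]
      rfl
  · have hnone : ((PySem.Set.ofList (p.2.zip dec)).filter (fun k => k.1 == v)).find?
        ((fun a => a.1.2 == d0) ∘ (fun k => (k, ((p.2.zip dec).count k : Int)))) = none := by
      rw [List.find?_eq_none]
      intro k hkmem
      have hkz : k ∈ p.2.zip dec := (PySem.Set.mem_ofList _ _).1 (List.mem_of_mem_filter hkmem)
      have hk1 : k.1 = v := by simpa using List.of_mem_filter hkmem
      simp only [Function.comp, beq_iff_eq]
      intro hk2
      exact hmem (by rw [← hk1, ← hk2]; exact hkz)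
    rw [hnone]
    have hc0 : (p.2.zip dec).count (v, d0) = 0 := List.count_eq_zero.2 hmem
    have := pv_count_pair (p.2.zip dec) v d0
    rw [hc0] at this
    simp only [Option.map_none]
    have hlen0 : ((((p.2.zip dec).filter (fun a => a.1 == v)).filter (fun a => a.2 == d0)).length : Int) = 0 := by
      omega
    show (d0, (0 : Int)) = (d0, (pvCnt p.2 dec v d0 : Int))
    unfold pvCnt
    rw [← hlen0]

lemma pv_filter_const {α : Type} (c : Bool) (l : List α) :
    l.filter (fun _ => c) = if c then l else [] := by cases c <;> simp

-- the flattened list of updates performed by A's second loop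
def pvUA (cols : List (List Int)) (dec : List Int) : List (Int × (Int × List Int) × (Int × Int)) :=
  (PySem.Set.ofList dec).flatMap (fun d =>
    (PySem.List.enumerate cols 0).flatMap (fun q =>
      ((PySem.List.enumerate dec 0).filter (fun r => r.2 == d)).map (fun r => (d, q, r))))

-- A's body (on cols = tab[:-1], dec = tab[-1]) computes the canonical table
lemma pv_A_eq (cols : List (List Int)) (dec : List Int)
    (hlen : ∀ col ∈ cols, dec.length ≤ col.length) :
    (((PySem.Set.ofList dec).foldl
        (fun sl d =>
          (PySem.List.enumerate cols 0).foldl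
            (fun sl q =>
              (PySem.List.enumerate dec 0).foldl
                (fun sl r =>
                  if r.2 == d then
                    sl.modify ("a" ++ PySem.Int.toStr (q.1 + 1)) PySem.Dict.empty
                      (fun inner =>
                        inner.modify (PySem.List.pyGetD q.2 r.1 0) PySem.Dict.empty
                          (fun cnts => cnts.modify d 0 (· + 1)))
                  else sl)
                sl)
            sl)
        ((PySem.List.enumerate cols 0).foldl
          (fun sl p => sl.insert ("a" ++ PySem.Int.toStr (p.1 + 1)) (pvInit p.2 dec))
          PySem.Dict.empty)).items.map
      (fun p => (p.1, p.2.items.map (fun q => (q.1, q.2.items))))) = pvCanon cols dec := by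
  have hinj := List.inj_on_of_nodup_map (pv_key_nodup cols)
  have hndE : (PySem.List.enumerate cols 0).Nodup :=
    List.Nodup.of_map _ (pv_key_nodup cols)
  -- flatten the triple loop into one fold over the update list pvUA
  have hflat : ∀ (sl : PySem.Dict String (PySem.Dict Int (PySem.Dict Int Int))),
      (PySem.Set.ofList dec).foldl
        (fun sl d =>
          (PySem.List.enumerate cols 0).foldl
            (fun sl q =>
              (PySem.List.enumerate dec 0).foldl
                (fun sl r =>
                  if r.2 == d then
                    sl.modify ("a" ++ PySem.Int.toStr (q.1 + 1)) PySem.Dict.empty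
                      (fun inner =>
                        inner.modify (PySem.List.pyGetD q.2 r.1 0) PySem.Dict.empty
                          (fun cnts => cnts.modify d 0 (· + 1)))
                  else sl)
                sl)
            sl)
        sl
      = (pvUA cols dec).foldl
          (fun sl a =>
            sl.modify ("a" ++ PySem.Int.toStr (a.2.1.1 + 1)) PySem.Dict.empty
              (fun inner =>
                inner.modify (PySem.List.pyGetD a.2.1.2 a.2.2.1 0) PySem.Dict.empty
                  (fun cnts => cnts.modify a.1 0 (· + 1))))
          sl := by
    intro sl
    simp only [pvUA, List.foldl_flatMap, List.foldl_map, List.foldl_filter]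
  -- initial dict: fresh inserts
  have hsl0 : ((PySem.List.enumerate cols 0).foldl
      (fun sl p => sl.insert ("a" ++ PySem.Int.toStr (p.1 + 1)) (pvInit p.2 dec))
      PySem.Dict.empty).items
      = (PySem.List.enumerate cols 0).map
          (fun p => ("a" ++ PySem.Int.toStr (p.1 + 1), pvInit p.2 dec)) := by
    have h := PySem.Dict.items_foldl_insert_fresh
        (l := PySem.List.enumerate cols 0)
        (k := fun p => "a" ++ PySem.Int.toStr (p.1 + 1))
        (v := fun p => pvInit p.2 dec)
        (d := PySem.Dict.empty)
        (fun a _ => PySem.Dict.contains_empty _) (pv_key_nodup cols)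
    simpa using h
  rw [hflat]
  have h1 := pv_items_foldl_modify
      (K := PySem.List.enumerate cols 0)
      (kf := fun p => "a" ++ PySem.Int.toStr (p.1 + 1))
      (pv_key_nodup cols)
      (F := fun a => fun inner =>
        inner.modify (PySem.List.pyGetD a.2.1.2 a.2.2.1 0) PySem.Dict.empty
          (fun cnts => cnts.modify a.1 0 (· + 1)))
      (dflt := PySem.Dict.empty)
      (tgt := fun a => "a" ++ PySem.Int.toStr (a.2.1.1 + 1))
      (L := pvUA cols dec)
      (by
        intro a ha
        simp only [pvUA, List.mem_flatMap, List.mem_map] at ha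
        obtain ⟨d, hd, q, hq, r, hr, rfl⟩ := ha
        exact ⟨q, hq, rfl⟩)
      (vf := fun p => pvInit p.2 dec) (d := _) hsl0
  beta_reduce at h1
  rw [h1, List.map_map]
  unfold pvCanon
  apply List.map_congr_left
  intro p hp
  simp only [Function.comp_def]
  -- the updates of pvUA that hit column p
  have hW : (pvUA cols dec).filter
        (fun a => ("a" ++ PySem.Int.toStr (a.2.1.1 + 1)) == ("a" ++ PySem.Int.toStr (p.1 + 1)))
      = (PySem.Set.ofList dec).flatMap (fun d =>
          ((PySem.List.enumerate dec 0).filter (fun r => r.2 == d)).map (fun r => (d, p, r))) := by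
    rw [pvUA, List.filter_flatMap]
    apply List.flatMap_congr
    intro d _
    rw [List.filter_flatMap]
    have hsingle := pv_flatMap_single (PySem.List.enumerate cols 0) hndE p hp
        (fun q => ("a" ++ PySem.Int.toStr (q.1 + 1)) == ("a" ++ PySem.Int.toStr (p.1 + 1)))
        (fun q => ((PySem.List.enumerate dec 0).filter (fun r => r.2 == d)).map (fun r => (d, q, r)))
        (fun q hq => by
          constructor
          · intro hbeq
            exact hinj hq hp (by simpa using hbeq)
          · rintro rfl; simp)
    beta_reduce at hsingle
    rw [← hsingle]
    apply List.flatMap_congr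
    intro q _
    rw [List.filter_map]
    simp only [Function.comp_def]
    rw [pv_filter_const]
    by_cases hc : (("a" ++ PySem.Int.toStr (q.1 + 1)) == ("a" ++ PySem.Int.toStr (p.1 + 1))) = true <;>
      simp [hc]
  rw [hW]
  have hp2 : p.2 ∈ cols := by
    obtain ⟨k, hk, he⟩ := (PySem.List.mem_enumerate_iff _ _ _).1 hp
    rw [he]
    simp
  have hlen2 : dec.length ≤ p.2.length := hlen _ hp2
  -- level-2 master lemma: per inner key v
  have h2 := pv_items_foldl_modify
      (K := PySem.Set.ofList p.2) (kf := fun (x : Int) => x)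
      (by simp)
      (F := fun a => fun cnts => cnts.modify a.1 0 (· + 1))
      (dflt := PySem.Dict.empty)
      (tgt := fun (a : Int × (Int × List Int) × (Int × Int)) => PySem.List.pyGetD a.2.1.2 a.2.2.1 0)
      (L := (PySem.Set.ofList dec).flatMap (fun d =>
          ((PySem.List.enumerate dec 0).filter (fun r => r.2 == d)).map (fun r => (d, p, r))))
      (by
        intro a ha
        simp only [List.mem_flatMap, List.mem_map, List.mem_filter] at ha
        obtain ⟨d, hd, r, ⟨hr, hrd⟩, rfl⟩ := ha
        obtain ⟨k, hk, rfl⟩ := (PySem.List.mem_enumerate_iff _ _ _).1 hr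
        have hkv : PySem.List.pyGetD p.2 ((0:Int) + (k:Int)) 0 = p.2[k]'(by omega) := by
          rw [zero_add, PySem.List.pyGetD_natCast]
          exact List.getD_eq_getElem p.2 0 (by omega)
        refine ⟨PySem.List.pyGetD p.2 ((0:Int) + (k:Int)) 0, ?_, rfl⟩
        rw [hkv]
        exact (PySem.Set.mem_ofList _ _).2 (List.getElem_mem _))
      (vf := fun _ => pvZeros dec) (d := pvInit p.2 dec) (pv_init_items p.2 dec)
  beta_reduce at h2
  rw [h2, List.map_map]
  refine congrArg _ ?_
  apply List.map_congr_left
  intro v hv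
  simp only [Function.comp_def]
  -- level-3 master lemma: per decision value d0
  have h3 := pv_items_foldl_modify
      (K := PySem.Set.ofList dec) (kf := fun (x : Int) => x)
      (by simp)
      (F := fun _ => fun (c : Int) => c + 1)
      (dflt := (0:Int))
      (tgt := fun (a : Int × (Int × List Int) × (Int × Int)) => a.1)
      (L := ((PySem.Set.ofList dec).flatMap (fun d =>
          ((PySem.List.enumerate dec 0).filter (fun r => r.2 == d)).map (fun r => (d, p, r)))).filter
          (fun a => PySem.List.pyGetD a.2.1.2 a.2.2.1 0 == v))
      (by
        intro a ha
        have ha' := List.mem_of_mem_filter ha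
        simp only [List.mem_flatMap, List.mem_map] at ha'
        obtain ⟨d, hd, r, _, rfl⟩ := ha'
        exact ⟨d, hd, rfl⟩)
      (vf := fun _ => (0:Int)) (d := pvZeros dec) (pv_zeros_items dec)
  beta_reduce at h3
  rw [h3]
  refine congrArg _ ?_
  apply List.map_congr_left
  intro d0 hd0
  rw [pv_foldl_len]
  have hcount : ((((PySem.Set.ofList dec).flatMap (fun d =>
          ((PySem.List.enumerate dec 0).filter (fun r => r.2 == d)).map (fun r => (d, p, r)))).filter
          (fun a => PySem.List.pyGetD a.2.1.2 a.2.2.1 0 == v)).filter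
          (fun a => a.1 == d0)).length = pvCnt p.2 dec v d0 := by
    rw [List.filter_filter, List.filter_flatMap]
    have hchunks : ∀ d ∈ PySem.Set.ofList dec,
        (((PySem.List.enumerate dec 0).filter (fun r => r.2 == d)).map (fun r => (d, p, r))).filter
            (fun a => a.1 == d0 && PySem.List.pyGetD a.2.1.2 a.2.2.1 0 == v)
          = if (d == d0) = true then
              (((PySem.List.enumerate dec 0).filter (fun r => r.2 == d0)).filter
                (fun r => PySem.List.pyGetD p.2 r.1 0 == v)).map (fun r => (d0, p, r))
            else [] := by
      intro d _
      rw [List.filter_map]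
      simp only [Function.comp_def]
      by_cases hdd : d = d0
      · subst hdd
        simp only [beq_self_eq_true, Bool.true_and, if_true]
      · have hdd' : (d == d0) = false := beq_eq_false_iff_ne.2 hdd
        simp [hdd']
    rw [List.flatMap_congr hchunks]
    rw [pv_flatMap_single (PySem.Set.ofList dec) (PySem.Set.nodup_ofList dec) d0 hd0
        (fun d => d == d0)
        (fun _ => (((PySem.List.enumerate dec 0).filter (fun r => r.2 == d0)).filter
          (fun r => PySem.List.pyGetD p.2 r.1 0 == v)).map (fun r => (d0, p, r)))
        (fun q _ => by simp)]
    rw [List.length_map]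
    have hc := pv_cnt_eq dec p.2 0 v d0 (by simpa using hlen2)
    simp only [Nat.cast_zero, List.drop_zero] at hc
    rw [hc]
    rfl
  rw [hcount]
  simp

lemma pv_last (tab : List (List Int)) (h : tab ≠ []) :
    PySem.List.pyGet? tab (-1) = some (tab.getLastD []) := by
  have hl : 0 < tab.length := List.length_pos_iff.2 h
  simp only [PySem.List.pyGet?, PySem.List.pyIdx?]
  rw [if_neg (by omega), if_pos (by omega)]
  have h1 : (-(-1:Int)).toNat = 1 := by decide
  rw [h1]
  show tab[tab.length - 1]? = some (tab.getLastD [])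
  rw [List.getElem?_eq_getElem (by omega)]
  rw [List.getLastD_eq_getLast?, List.getLast?_eq_getElem?]
  rw [List.getElem?_eq_getElem (by omega)]
  rfl

lemma pv_slice_a (tab : List (List Int)) (h : tab ≠ []) :
    PySem.List.slice tab none (some ((tab.length : Int) - 1)) = tab.dropLast := by
  have hl : 0 < tab.length := List.length_pos_iff.2 h
  have hc : ((tab.length : Int) - 1) = ((tab.length - 1 : Nat) : Int) := by push_cast [Nat.cast_sub hl]; ring
  rw [hc, PySem.List.slice_to_natCast, List.dropLast_eq_take]

-- ===== VERDICT (by name: the statement is the Claim_ definition above) =====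
theorem podzial_spec : Claim_equal_podzial := by
  intro tab _ hpre
  unfold Spec_podzial
  obtain ⟨hne, hlenp⟩ := hpre
  have hA := pv_A_eq tab.dropLast (tab.getLastD []) hlenp
  have hB := pv_B_eq tab.dropLast (tab.getLastD [])
  simp only [pvInit, pvZeros] at hA hB
  unfold podzial podzial_alt
  rw [pv_last tab hne, pv_slice_a tab hne, PySem.List.slice_to_neg_one]
  simp only []
  rw [hA, ← hB]
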